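-- pv_equiv track=rewrite | github.com/bhokansonfasig/Project_Euler | useful_functions.py | check_threepeating
-- ===== SOURCE A (Python) =====
-- def check_threepeating(candidate,period):
--     if period<1:
--         return False
--     repeating = True
--     for i in range(len(candidate)-2*period):
--         if candidate[i]!=candidate[i+period] or \
--         candidate[i]!=candidate[i+2*period]:
--             repeating = False
--             break
--     return repeating
-- ===== SOURCE B (Python) =====
-- def check_threepeating(candidate, period):
--     if period < 1:
--         return False
--     m = len(candidate) - 2*period
--     if m <= 0:
--         return True
--     return candidate[:m] == candidate[period:period+m] == candidate[2*period:2*period+m]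
-- ===== Notes on version B (the rewrite author's own statement) =====
-- stated objective: idiomatic
-- what changed: Replaces the index-by-index loop with flag-and-break by three aligned whole-slice comparisons (candidate[:m] == candidate[period:period+m] == candidate[2*period:2*period+m]).
import Mathlib
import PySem

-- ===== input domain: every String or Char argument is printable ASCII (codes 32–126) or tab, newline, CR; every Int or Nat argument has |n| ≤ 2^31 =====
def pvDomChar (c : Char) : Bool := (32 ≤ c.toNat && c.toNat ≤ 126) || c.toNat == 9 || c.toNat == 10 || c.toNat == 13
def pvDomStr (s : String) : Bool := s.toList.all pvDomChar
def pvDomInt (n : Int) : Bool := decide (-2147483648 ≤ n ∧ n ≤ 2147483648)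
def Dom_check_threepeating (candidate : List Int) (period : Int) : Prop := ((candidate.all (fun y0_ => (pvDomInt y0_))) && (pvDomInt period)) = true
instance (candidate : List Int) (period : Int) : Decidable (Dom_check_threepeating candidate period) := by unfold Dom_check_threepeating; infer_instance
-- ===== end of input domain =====

-- B replaces A's index-by-index loop (with flag and break) by three aligned whole-slice comparisons; same cost, plainer code.

-- ===== PORT A =====
-- the 'for i in range(...)' loop with the flag-and-break; every index i, i+period, i+2*period
-- the loop visits is in range, so pyGet? is always 'some' there and comparing the options is exact
def pvLoopA (xs : List Int) (p : Int) : List Int → Bool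
  | [] => true
  | i :: rest =>
    if PySem.List.pyGet? xs i ≠ PySem.List.pyGet? xs (i + p) ∨
       PySem.List.pyGet? xs i ≠ PySem.List.pyGet? xs (i + 2 * p) then false
    else pvLoopA xs p rest

def check_threepeating (candidate : List Int) (period : Int) : Bool :=
  if period < 1 then false
  else pvLoopA candidate period
    (PySem.List.pyRange 0 ((candidate.length : Int) - 2 * period) 1)

-- ===== PORT B =====
def check_threepeating_alt (candidate : List Int) (period : Int) : Bool :=
  if period < 1 then false
  else
    let m := (candidate.length : Int) - 2 * period
    if m ≤ 0 then true
    else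
      let s0 := PySem.List.slice candidate (some 0) (some m)
      let s1 := PySem.List.slice candidate (some period) (some (period + m))
      let s2 := PySem.List.slice candidate (some (2 * period)) (some (2 * period + m))
      s0 == s1 && s1 == s2

-- ===== PRECONDITION & SPEC =====
def Spec_check_threepeating (candidate : List Int) (period : Int) (out : Bool) : Prop := out = check_threepeating_alt candidate period
instance (candidate : List Int) (period : Int) (out : Bool) : Decidable (Spec_check_threepeating candidate period out) := by unfold Spec_check_threepeating; infer_instance

-- ===== CLAIM (what is proved, stated in full; the proofs are below) =====
def Claim_equal_check_threepeating : Prop := ∀ (candidate : List Int) (period : Int), Dom_check_threepeating candidate period → Spec_check_threepeating candidate period (check_threepeating candidate period)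

-- ===== LEMMAS AND PROOFS =====

lemma pvLoopA_eq_all (xs : List Int) (p : Int) (l : List Int) :
    pvLoopA xs p l = l.all (fun i =>
      decide (PySem.List.pyGet? xs i = PySem.List.pyGet? xs (i + p)) &&
      decide (PySem.List.pyGet? xs i = PySem.List.pyGet? xs (i + 2 * p))) := by
  induction l with
  | nil => rfl
  | cons i rest ih =>
    simp only [pvLoopA, List.all_cons, ih]
    by_cases h1 : PySem.List.pyGet? xs i = PySem.List.pyGet? xs (i + p) <;>
      by_cases h2 : PySem.List.pyGet? xs i = PySem.List.pyGet? xs (i + 2 * p) <;>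
      simp [h1, h2]

-- equality of two aligned take/drop windows, index by index
lemma pv_take_drop_eq_iff (xs : List Int) (a b m : Nat) :
    ((xs.drop a).take m = (xs.drop b).take m) ↔ ∀ k, k < m → xs[k+a]? = xs[k+b]? := by
  constructor
  · intro h k hk
    have := congrArg (fun l => l[k]?) h
    simpa [List.getElem?_take, List.getElem?_drop, hk, Nat.add_comm] using this
  · intro hh
    apply List.ext_getElem?
    intro i
    by_cases hi : i < m
    · simpa [List.getElem?_take, List.getElem?_drop, hi, Nat.add_comm] using hh i hi
    · simp [hi]

lemma pv_main (xs : List Int) (p : Int) :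
    check_threepeating xs p = check_threepeating_alt xs p := by
  unfold check_threepeating check_threepeating_alt
  by_cases hp : p < 1
  · simp [hp]
  · simp only [hp, if_false]
    by_cases hm : (xs.length : Int) - 2 * p ≤ 0
    · rw [PySem.List.pyRange_one_eq_nil (by omega)]
      simp [pvLoopA, hm]
    · simp only [hm, if_false]
      obtain ⟨pn, rfl⟩ : ∃ pn : Nat, p = (pn : Int) :=
        ⟨p.toNat, (Int.toNat_of_nonneg (by omega)).symm⟩
      obtain ⟨mn, hmn⟩ : ∃ mn : Nat, (xs.length : Int) - 2 * (pn : Int) = (mn : Int) :=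
        ⟨_, (Int.toNat_of_nonneg (by omega)).symm⟩
      have h2p : (2 : Int) * (pn : Int) = ((2 * pn : Nat) : Int) := by push_cast; ring
      have gkp : ∀ k : Nat, PySem.List.pyGet? xs ((k : Int) + (pn : Int)) = xs[k+pn]? := by
        intro k; rw [← Nat.cast_add, PySem.List.pyGet?_natCast]
      have gk2p : ∀ k : Nat, PySem.List.pyGet? xs ((k : Int) + ((2 * pn : Nat) : Int)) = xs[k+2*pn]? := by
        intro k; rw [← Nat.cast_add, PySem.List.pyGet?_natCast]
      rw [hmn, pvLoopA_eq_all, PySem.List.pyRange_one, h2p,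
        PySem.List.slice_zero_start, PySem.List.slice_to_natCast,
        PySem.List.slice_natCast_add, PySem.List.slice_natCast_add,
        Bool.eq_iff_iff]
      simp only [List.all_eq_true, List.mem_map, List.mem_range, forall_exists_index,
        and_imp, forall_apply_eq_imp_iff₂, Bool.and_eq_true, decide_eq_true_eq,
        beq_iff_eq, zero_add, Int.sub_zero, Int.toNat_natCast,
        PySem.List.pyGet?_natCast, gkp, gk2p]
      have t01 := pv_take_drop_eq_iff xs 0 pn mn
      have t12 := pv_take_drop_eq_iff xs pn (2 * pn) mn
      simp only [List.drop_zero, Nat.add_zero] at t01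
      rw [t01, t12]
      constructor
      · intro h
        exact ⟨fun k hk => (h k hk).1,
               fun k hk => ((h k hk).1).symm.trans (h k hk).2⟩
      · intro ⟨e1, e2⟩ k hk
        exact ⟨e1 k hk, (e1 k hk).trans (e2 k hk)⟩

-- ===== VERDICT (by name: the statement is the Claim_ definition above) =====
theorem check_threepeating_spec : Claim_equal_check_threepeating := by
  intro candidate period _
  exact pv_main candidate period
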